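-- pv_equiv track=rewrite | github.com/arc-l/TRLB | hetrogenous_objects/Vertex_Weighted_TRLB/Labeled_DFS_DP.py | get_real_RB
-- ===== SOURCE A (Python) =====
-- def get_real_RB(action_sequence, Weights):
--     ''' get the weighted RB size from a sequence '''
--     current_buffer_set = set()
--     RB = 0
--     current_RB = 0
--     for objID, mode in action_sequence:
--         if mode == 'b':
--             current_buffer_set.add(objID)
--             current_RB += Weights[objID]
--             RB = max(RB, current_RB)
--         elif objID in current_buffer_set:
--             current_buffer_set.remove(objID)
--             current_RB -= Weights[objID]
--     return RB
-- ===== SOURCE B (Python) =====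
-- def get_real_RB(action_sequence, Weights):
--     ''' get the weighted RB size from a sequence '''
--     # Phase 1: per-object in/out state machine -> one signed weight delta per step.
--     active = {}
--     deltas = []
--     for objID, mode in action_sequence:
--         if mode == 'b':
--             active[objID] = True
--             deltas.append(Weights[objID])
--         elif active.get(objID, False):
--             active[objID] = False
--             deltas.append(-Weights[objID])
--         else:
--             deltas.append(0)
--     # Phase 2: peak of the running prefix sums, sampled at the 'b' steps (start 0).
--     best = 0
--     level = 0
--     for (_, mode), d in zip(action_sequence, deltas):
--         level += d
--         if mode == 'b':
--             best = max(best, level)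
--     return best
-- ===== Notes on version B (the rewrite author's own statement) =====
-- stated objective: alternative
-- what changed: Replaces the single loop with running max over a membership set by a two-phase decomposition: first a per-object boolean state machine materialises a signed weight delta per action, then a separate prefix-sum scan takes the peak sampled at the 'b' steps.
import Mathlib
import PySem

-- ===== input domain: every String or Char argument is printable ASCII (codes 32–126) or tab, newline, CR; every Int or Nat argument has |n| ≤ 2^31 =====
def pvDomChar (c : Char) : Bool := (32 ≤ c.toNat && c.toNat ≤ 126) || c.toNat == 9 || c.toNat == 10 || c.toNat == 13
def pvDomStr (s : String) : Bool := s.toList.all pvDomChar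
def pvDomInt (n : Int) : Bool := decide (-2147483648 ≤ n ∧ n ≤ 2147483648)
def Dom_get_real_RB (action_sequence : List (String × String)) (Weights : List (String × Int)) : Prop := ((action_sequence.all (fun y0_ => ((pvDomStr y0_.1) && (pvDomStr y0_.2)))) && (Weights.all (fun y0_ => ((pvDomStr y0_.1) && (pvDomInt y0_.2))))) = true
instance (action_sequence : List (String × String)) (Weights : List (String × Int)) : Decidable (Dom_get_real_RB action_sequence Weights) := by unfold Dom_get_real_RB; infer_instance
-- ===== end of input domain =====

-- B replaces A's single loop (membership set + running max) by a two-phase decomposition: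
-- a per-object boolean state machine producing a delta list, then a prefix-sum peak scan.


-- ===== PORT A =====
-- Weights[objID] raises KeyError when the key is missing; Pre_ excludes exactly those inputs,
-- so the total 'getD … 0' is exact on Pre_ (the remove branch only fires after a successful add).
-- 'current_buffer_set.remove' is guarded by membership, so it equals Set.discard there.
def get_real_RB (action_sequence : List (String × String)) (Weights : List (String × Int)) : Int :=
  let W := PySem.Dict.ofList Weights
  let st := action_sequence.foldl
    (fun (st : PySem.Set String × Int × Int) p =>
      if p.2 = "b" then
        let buf := PySem.Set.add st.1 p.1
        let cur := st.2.2 + W.getD p.1 0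
        (buf, max st.2.1 cur, cur)
      else if PySem.Set.contains st.1 p.1 then
        (PySem.Set.discard st.1 p.1, st.2.1, st.2.2 - W.getD p.1 0)
      else st)
    (PySem.Set.empty, 0, 0)
  st.2.1

-- ===== PORT B =====
-- Phase 1: per-object boolean state machine emitting one signed delta per action.
def pvPhase1 (W : PySem.Dict String Int)
    (st : PySem.Dict String Bool × List Int) (p : String × String) :
    PySem.Dict String Bool × List Int :=
  if p.2 = "b" then (st.1.insert p.1 true, st.2 ++ [W.getD p.1 0])
  else if st.1.getD p.1 false then (st.1.insert p.1 false, st.2 ++ [-(W.getD p.1 0)])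
  else (st.1, st.2 ++ [0])

-- Phase 2: peak of the prefix sums, sampled at the 'b' steps.
def pvPhase2 (st : Int × Int) (q : (String × String) × Int) : Int × Int :=
  let level := st.2 + q.2
  (if q.1.2 = "b" then max st.1 level else st.1, level)

def get_real_RB_alt (action_sequence : List (String × String)) (Weights : List (String × Int)) : Int :=
  let W := PySem.Dict.ofList Weights
  let ph := action_sequence.foldl (pvPhase1 W) (PySem.Dict.empty, [])
  let fin := (action_sequence.zip ph.2).foldl pvPhase2 (0, 0)
  fin.1

-- ===== PRECONDITION & SPEC =====
-- Pre_ excludes exactly the inputs where Python raises KeyError: an action with mode 'b'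
-- whose objID is not a key of Weights (the remove branch only reaches keys added before).
def Pre_get_real_RB (action_sequence : List (String × String)) (Weights : List (String × Int)) : Prop :=
  ∀ p ∈ action_sequence, p.2 = "b" → p.1 ∈ Weights.map Prod.fst
instance (action_sequence : List (String × String)) (Weights : List (String × Int)) : Decidable (Pre_get_real_RB action_sequence Weights) := by unfold Pre_get_real_RB; infer_instance

def pvWitness_get_real_RB : (List (String × String)) × (List (String × Int)) :=
  ([("a", "b"), ("c", "b"), ("a", "r")], [("a", 2), ("c", 5)])

def Spec_get_real_RB (action_sequence : List (String × String)) (Weights : List (String × Int)) (out : Int) : Prop := out = get_real_RB_alt action_sequence Weights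
instance (action_sequence : List (String × String)) (Weights : List (String × Int)) (out : Int) : Decidable (Spec_get_real_RB action_sequence Weights out) := by unfold Spec_get_real_RB; infer_instance

-- ===== CLAIM (what is proved, stated in full; the proofs are below) =====
def Claim_equal_get_real_RB : Prop := ∀ (action_sequence : List (String × String)) (Weights : List (String × Int)), Dom_get_real_RB action_sequence Weights → Pre_get_real_RB action_sequence Weights → Spec_get_real_RB action_sequence Weights (get_real_RB action_sequence Weights)

-- ===== LEMMAS AND PROOFS =====

-- The delta list phase 1 emits from a given per-object state, written recursively.
def pvDeltas (W : PySem.Dict String Int) :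
    List (String × String) → PySem.Dict String Bool → List Int
  | [], _ => []
  | p :: rest, active =>
    if p.2 = "b" then W.getD p.1 0 :: pvDeltas W rest (active.insert p.1 true)
    else if active.getD p.1 false then
      -(W.getD p.1 0) :: pvDeltas W rest (active.insert p.1 false)
    else 0 :: pvDeltas W rest active

-- phase 1's fold appends exactly pvDeltas to its accumulator.
lemma pvPhase1_deltas (W : PySem.Dict String Int) :
    ∀ (seq : List (String × String)) (active : PySem.Dict String Bool) (acc : List Int),
      (seq.foldl (pvPhase1 W) (active, acc)).2 = acc ++ pvDeltas W seq active := by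
  intro seq
  induction seq with
  | nil => intro active acc; simp [pvDeltas]
  | cons p rest ih =>
    intro active acc
    simp only [List.foldl_cons, pvPhase1, pvDeltas]
    split_ifs <;> simp [ih]

-- Core invariant: A's loop from state (buf, RB, cur) returns the phase-2 peak of the
-- deltas emitted from any per-object state 'active' agreeing with 'buf' on membership.
lemma pvMain (W : PySem.Dict String Int) :
    ∀ (seq : List (String × String)) (buf : PySem.Set String)
      (active : PySem.Dict String Bool) (RB cur : Int),
      (∀ x, PySem.Set.contains buf x = active.getD x false) →
      (seq.foldl
        (fun (st : PySem.Set String × Int × Int) p =>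
          if p.2 = "b" then
            let buf := PySem.Set.add st.1 p.1
            let cur := st.2.2 + W.getD p.1 0
            (buf, max st.2.1 cur, cur)
          else if PySem.Set.contains st.1 p.1 then
            (PySem.Set.discard st.1 p.1, st.2.1, st.2.2 - W.getD p.1 0)
          else st)
        (buf, RB, cur)).2.1
      = ((seq.zip (pvDeltas W seq active)).foldl pvPhase2 (RB, cur)).1 := by
  intro seq
  induction seq with
  | nil => intro buf active RB cur _; simp [pvDeltas]
  | cons p rest ih =>
    intro buf active RB cur hinv
    by_cases hb : p.2 = "b"
    · simp only [pvDeltas, hb, if_pos, List.zip_cons_cons, List.foldl_cons, pvPhase2]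
      refine ih _ _ _ _ (fun x => ?_)
      by_cases hx : x = p.1
      · subst hx
        simp [PySem.Set.contains_eq_listContains, PySem.Set.mem_add]
      · have := hinv x
        simp [PySem.Set.contains_eq_listContains, PySem.Set.mem_add,
              PySem.Dict.getD_insert, hx] at this ⊢
        exact this
    · have hmem := hinv p.1
      by_cases hc : PySem.Set.contains buf p.1 = true
      · have hact : active.getD p.1 false = true := by rw [← hmem]; exact hc
        simp only [pvDeltas, hb, if_false, hact, if_true, List.zip_cons_cons,
          List.foldl_cons, pvPhase2, hc]
        rw [show cur + -(W.getD p.1 0) = cur - W.getD p.1 0 by ring]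
        refine ih _ _ _ _ (fun x => ?_)
        by_cases hx : x = p.1
        · subst hx
          simp [PySem.Set.contains_eq_listContains, PySem.Set.mem_discard]
        · have := hinv x
          simp [PySem.Set.contains_eq_listContains, PySem.Set.mem_discard,
                PySem.Dict.getD_insert, hx] at this ⊢
          exact this
      · have hact : active.getD p.1 false = false := by rw [← hmem]; simpa using hc
        simp only [pvDeltas, hb, if_false, hact, List.zip_cons_cons,
          List.foldl_cons, pvPhase2, hc, Bool.false_eq_true, add_zero]
        exact ih _ _ _ _ hinv

-- ===== VERDICT (by name: the statement is the Claim_ definition above) =====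
theorem get_real_RB_spec : Claim_equal_get_real_RB := by
  intro seq Weights _ _
  unfold Spec_get_real_RB
  show (List.foldl
      (fun (st : PySem.Set String × Int × Int) p =>
        if p.2 = "b" then
          let buf := PySem.Set.add st.1 p.1
          let cur := st.2.2 + (PySem.Dict.ofList Weights).getD p.1 0
          (buf, max st.2.1 cur, cur)
        else if PySem.Set.contains st.1 p.1 then
          (PySem.Set.discard st.1 p.1, st.2.1, st.2.2 - (PySem.Dict.ofList Weights).getD p.1 0)
        else st)
      (PySem.Set.empty, 0, 0) seq).2.1
    = (List.foldl pvPhase2 (0, 0)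
        (seq.zip (List.foldl (pvPhase1 (PySem.Dict.ofList Weights)) (PySem.Dict.empty, []) seq).2)).1
  rw [pvPhase1_deltas (PySem.Dict.ofList Weights) seq PySem.Dict.empty []]
  simpa using pvMain (PySem.Dict.ofList Weights) seq PySem.Set.empty PySem.Dict.empty 0 0
    (by intro x; simp [PySem.Set.contains_eq_listContains, PySem.Set.empty, PySem.Dict.getD_empty])
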